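-- pv_equiv track=rewrite | github.com/hemolack/aoc2021 | 15.py | tile_map
-- ===== SOURCE A (Python) =====
-- def wrap_value(n):
--     if n > 9: return n - 9
--     else: return n
--
-- def tile_map(map):
--     new_map = []
--     for j in range(5):
--         for row in map:
--             new_row = []
--             for i in range(5):
--                 new_row = new_row + [wrap_value(x + i + j) for x in row]
--             new_map.append(new_row)
--     return new_map
-- ===== SOURCE B (Python) =====
-- def wrap_value(n):
--     if n > 9: return n - 9
--     else: return n
--
-- def tile_map(map):
--     # phase 1: tabulate the 9 possible shifted maps
--     shifted = [[[wrap_value(x + s) for x in row] for row in map] for s in range(9)]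
--     # phase 2: assemble the 5x5 tiling by looking rows up in the table
--     return [sum((shifted[i + j][r] for i in range(5)), [])
--             for j in range(5)
--             for r in range(len(map))]
-- ===== Notes on version B (the rewrite author's own statement) =====
-- stated objective: alternative
-- what changed: B precomputes a table of the 9 possible wrapped-shifted maps once, then assembles the 5x5 tiling as a comprehension that concatenates rows looked up in that table, instead of recomputing wrap_value(x+i+j) per cell per tile with nested append loops.
import Mathlib
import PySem

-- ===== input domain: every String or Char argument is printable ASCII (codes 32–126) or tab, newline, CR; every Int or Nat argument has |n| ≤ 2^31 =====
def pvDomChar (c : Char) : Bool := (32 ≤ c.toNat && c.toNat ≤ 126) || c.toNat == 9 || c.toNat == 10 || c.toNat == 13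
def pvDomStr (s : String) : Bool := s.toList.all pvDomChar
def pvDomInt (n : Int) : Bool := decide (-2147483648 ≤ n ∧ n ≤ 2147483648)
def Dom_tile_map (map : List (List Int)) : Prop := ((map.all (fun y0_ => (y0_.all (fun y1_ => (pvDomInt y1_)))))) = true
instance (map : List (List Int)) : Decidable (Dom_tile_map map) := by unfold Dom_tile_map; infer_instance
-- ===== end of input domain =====

-- B tabulates the 9 shifted maps once and assembles the tiling from the table (alternative decomposition, same result).

-- ===== PORT A =====
def wrap_value (n : Int) : Int := if n > 9 then n - 9 else n

def tile_map (map : List (List Int)) : List (List Int) :=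
  (List.range 5).foldl (fun new_map (j : Nat) =>
    map.foldl (fun nm row =>
      nm ++ [(List.range 5).foldl (fun new_row (i : Nat) =>
        new_row ++ row.map (fun x => wrap_value (x + (i : Int) + (j : Int)))) []]) new_map) []

-- ===== PORT B =====
-- shifted[i+j][r] is always in range in Source B (i+j < 9, r < len(map)); List.getD is exact there.
-- sum(gen, []) of lists = left fold of ++ from []; the double comprehension is flatMap/map.
def tile_map_alt (map : List (List Int)) : List (List Int) :=
  let shifted := (List.range 9).map (fun (s : Nat) => map.map (fun row => row.map (fun x => wrap_value (x + (s : Int)))))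
  (List.range 5).flatMap (fun (j : Nat) =>
    (List.range map.length).map (fun (r : Nat) =>
      (List.range 5).foldl (fun acc (i : Nat) =>
        acc ++ ((shifted.getD (i + j) []).getD r [])) []))

-- ===== PRECONDITION & SPEC =====
def Spec_tile_map (map : List (List Int)) (out : List (List Int)) : Prop := out = tile_map_alt map
instance (map : List (List Int)) (out : List (List Int)) : Decidable (Spec_tile_map map out) := by unfold Spec_tile_map; infer_instance

-- ===== CLAIM (what is proved, stated in full; the proofs are below) =====
def Claim_equal_tile_map : Prop := ∀ (map : List (List Int)), Dom_tile_map map → Spec_tile_map map (tile_map map)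

-- ===== LEMMAS AND PROOFS =====

-- A's row for tile column offset j
def rowA (j : Nat) (row : List Int) : List Int :=
  (List.range 5).foldl (fun new_row (i : Nat) =>
    new_row ++ row.map (fun x => wrap_value (x + (i : Int) + (j : Int)))) []

-- B's row for tile column offset j and source row index r (shifted table inlined)
def rowB (m : List (List Int)) (j r : Nat) : List Int :=
  (List.range 5).foldl (fun new_row (i : Nat) =>
    new_row ++ ((((List.range 9).map (fun (s : Nat) => m.map (fun row => row.map (fun x => wrap_value (x + (s : Int)))))).getD (i + j) []).getD r [])) []

lemma tileA_eq (m : List (List Int)) :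
    tile_map m = (List.range 5).flatMap (fun j => m.map (rowA j)) := by
  unfold tile_map
  rw [show (fun (new_map : List (List Int)) (j : Nat) =>
      m.foldl (fun nm row =>
        nm ++ [(List.range 5).foldl (fun new_row (i : Nat) =>
          new_row ++ row.map (fun x => wrap_value (x + (i : Int) + (j : Int)))) []]) new_map)
    = fun new_map j => new_map ++ m.map (rowA j) from by
      funext nm j
      exact PySem.List.foldl_append_singleton_eq_map (fun row => rowA j row) m nm]
  simpa using PySem.List.foldl_append_eq_flatMap (fun j => m.map (rowA j)) (List.range 5) []

lemma rowB_eq_rowA (m : List (List Int)) (j r : Nat) (hj : j < 5) (hr : r < m.length) :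
    rowB m j r = rowA j (m.getD r []) := by
  unfold rowB rowA
  apply PySem.List.foldl_congr_mem
  intro acc i hi
  have hi5 : i < 5 := List.mem_range.mp hi
  have h9 : i + j < 9 := by omega
  congr 1
  rw [PySem.List.getD_map_range _ 9 (i + j) _ h9]
  rw [List.getD_eq_getElem _ _ (by simpa using hr), List.getD_eq_getElem _ _ hr]
  simp only [List.getElem_map]
  apply List.map_congr_left
  intro x _
  congr 1
  push_cast
  ring

lemma map_range_getD (m : List (List Int)) (f : List Int → List Int) :
    (List.range m.length).map (fun r => f (m.getD r [])) = m.map f := by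
  apply List.ext_getElem
  · simp
  · intro k h1 h2
    have hk : k < m.length := by simpa using h2
    simp only [List.getElem_map, List.getElem_range]
    rw [List.getD_eq_getElem _ _ hk]

-- ===== VERDICT (by name: the statement is the Claim_ definition above) =====
theorem tile_map_spec : Claim_equal_tile_map := by
  intro m _
  show tile_map m = tile_map_alt m
  rw [tileA_eq]
  show _ = (List.range 5).flatMap (fun j => (List.range m.length).map (rowB m j))
  apply List.flatMap_congr ?_
  intro j hj
  have hj5 : j < 5 := List.mem_range.mp hj
  rw [List.map_congr_left (fun r hr => rowB_eq_rowA m j r hj5 (List.mem_range.mp hr))]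
  exact (map_range_getD m (rowA j)).symm
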